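-- pv_equiv track=rewrite | github.com/rpycgo/Algorithm | LeetCode/weekly_contest/486/1.py | minimumPrefixLength
-- ===== SOURCE A (Python) =====
-- from typing import List
--
-- def minimumPrefixLength(nums: List[int]) -> int:
--     split_idx = 0
--     idx = 1
--     prev_num = nums[0]
--
--     while idx < len(nums):
--         if prev_num >= nums[idx]:
--             split_idx = idx
--
--         prev_num = nums[idx]
--         idx += 1
--
--     return split_idx
-- ===== SOURCE B (Python) =====
-- from typing import List
--
-- def minimumPrefixLength(nums: List[int]) -> int:
--     for idx in range(len(nums) - 1, 0, -1):
--         if nums[idx - 1] >= nums[idx]: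
--             return idx
--     return 0
-- ===== Notes on version B (the rewrite author's own statement) =====
-- stated objective: alternative
-- what changed: Replaced A's full forward while-loop that keeps overwriting the last non-increasing index with a reverse scan that returns the first non-increasing step found from the end (early exit, no prev/split state).
import Mathlib
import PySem

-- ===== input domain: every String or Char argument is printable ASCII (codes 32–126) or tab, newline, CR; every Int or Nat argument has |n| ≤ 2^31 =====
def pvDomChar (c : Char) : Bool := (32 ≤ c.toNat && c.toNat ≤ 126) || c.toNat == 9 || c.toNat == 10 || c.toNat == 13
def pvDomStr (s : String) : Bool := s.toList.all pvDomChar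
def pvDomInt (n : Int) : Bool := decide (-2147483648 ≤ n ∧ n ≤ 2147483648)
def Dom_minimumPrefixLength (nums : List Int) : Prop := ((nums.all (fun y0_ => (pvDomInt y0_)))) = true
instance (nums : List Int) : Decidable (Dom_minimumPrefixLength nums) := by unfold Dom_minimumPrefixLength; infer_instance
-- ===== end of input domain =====

-- B replaces A's forward while-loop with state (split_idx, prev_num) by a reverse scan that
-- returns the first non-increasing step from the end (alternative decomposition, early exit).


-- ===== PORT A =====
-- body of A's while loop: state (split_idx, prev_num), current index idx
def aStep (nums : List Int) (st : Int × Int) (idx : Int) : Int × Int :=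
  let cur := PySem.List.pyGetD nums idx 0
  ((if st.2 ≥ cur then idx else st.1), cur)

def minimumPrefixLength (nums : List Int) : Int :=
  match PySem.List.pyGet? nums 0 with
  | none => 0   -- Python raises IndexError here; excluded by Pre_
  | some p0 =>
    ((PySem.List.pyRange 1 (nums.length : Int) 1).foldl (aStep nums) (0, p0)).1

-- ===== PORT B =====
-- B's for-loop with early return: first idx (scanning the given index list) with nums[idx-1] >= nums[idx]
def altGo (nums : List Int) : List Int → Int
  | [] => 0
  | idx :: rest =>
    if PySem.List.pyGetD nums (idx - 1) 0 ≥ PySem.List.pyGetD nums idx 0 then idx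
    else altGo nums rest

def minimumPrefixLength_alt (nums : List Int) : Int :=
  altGo nums (PySem.List.pyRange ((nums.length : Int) - 1) 0 (-1))

-- ===== PRECONDITION & SPEC =====
-- Pre_ excludes only the empty list, on which Python A raises IndexError (nums[0]).
def Pre_minimumPrefixLength (nums : List Int) : Prop := nums ≠ []
instance (nums : List Int) : Decidable (Pre_minimumPrefixLength nums) := by
  unfold Pre_minimumPrefixLength; infer_instance
def pvWitness_minimumPrefixLength : List Int := [3, 1, 2]

def Spec_minimumPrefixLength (nums : List Int) (out : Int) : Prop := out = minimumPrefixLength_alt nums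
instance (nums : List Int) (out : Int) : Decidable (Spec_minimumPrefixLength nums out) := by unfold Spec_minimumPrefixLength; infer_instance

-- ===== CLAIM (what is proved, stated in full; the proofs are below) =====
def Claim_equal_minimumPrefixLength : Prop := ∀ (nums : List Int), Dom_minimumPrefixLength nums → Pre_minimumPrefixLength nums → Spec_minimumPrefixLength nums (minimumPrefixLength nums)

-- ===== LEMMAS AND PROOFS =====

-- the pure "last non-increasing index" fold step
def pvPureStep (nums : List Int) (acc : Int) (idx : Int) : Int :=
  if PySem.List.pyGetD nums (idx - 1) 0 ≥ PySem.List.pyGetD nums idx 0 then idx else acc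

-- A's paired fold over a consecutive range carries prev = nums[position-1]:
-- its first component is the pure fold, its second the last element read.
theorem aStep_fold_inv (nums : List Int) (a b : Int) (ha : 1 ≤ a) (d : Int) :
    (PySem.List.pyRange a b 1).foldl (aStep nums) (d, PySem.List.pyGetD nums (a - 1) 0)
      = ((PySem.List.pyRange a b 1).foldl (pvPureStep nums) d,
         PySem.List.pyGetD nums (max a b - 1) 0) := by
  by_cases hab : b ≤ a
  · rw [PySem.List.pyRange_one_eq_nil hab]
    simp [max_eq_left hab]
  · push Not at hab
    have hlt : ((b - (a+1)).toNat) < ((b - a).toNat) := by omega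
    rw [PySem.List.pyRange_one_cons hab]
    simp only [List.foldl_cons]
    have h1 : aStep nums (d, PySem.List.pyGetD nums (a - 1) 0) a
        = (pvPureStep nums d a, PySem.List.pyGetD nums ((a + 1) - 1) 0) := by
      simp [aStep, pvPureStep]
    rw [h1, aStep_fold_inv nums (a+1) b (by omega) (pvPureStep nums d a)]
    have : max (a+1) b = max a b := by omega
    rw [this]
termination_by (b - a).toNat
decreasing_by omega

-- last satisfying index of a list = first satisfying index of its reverse
theorem pure_fold_eq_altGo_reverse (nums : List Int) (l : List Int) :
    l.foldl (pvPureStep nums) 0 = altGo nums l.reverse := by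
  induction l using List.reverseRecOn with
  | nil => simp [altGo]
  | append_singleton l x ih =>
      rw [List.foldl_append, List.reverse_append]
      simp only [List.foldl_cons, List.foldl_nil, List.reverse_cons, List.reverse_nil,
        List.nil_append, List.singleton_append, altGo, pvPureStep]
      split_ifs <;> simp [ih]

-- ===== VERDICT (by name: the statement is the Claim_ definition above) =====
theorem minimumPrefixLength_spec : Claim_equal_minimumPrefixLength := by
  intro nums _ hpre
  unfold Spec_minimumPrefixLength minimumPrefixLength minimumPrefixLength_alt
  match hn : nums with
  | [] => exact absurd rfl hpre
  | x :: xs =>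
    have h0 : PySem.List.pyGet? (x :: xs) 0 = some x := by
      simp [PySem.List.pyGet?, PySem.List.pyIdx?]
    rw [h0]
    have key := aStep_fold_inv (x :: xs) 1 ((x :: xs).length : Int) (le_refl 1) 0
    rw [show PySem.List.pyGetD (x :: xs) ((1:Int) - 1) 0 = x from by
      simp [PySem.List.pyGetD, PySem.List.pyGet?, PySem.List.pyIdx?]] at key
    show (List.foldl (aStep (x :: xs)) (0, x) (PySem.List.pyRange 1 ((x :: xs).length : Int) 1)).1
        = altGo (x :: xs) (PySem.List.pyRange (((x :: xs).length : Int) - 1) 0 (-1))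
    rw [key]
    rw [pure_fold_eq_altGo_reverse]
    have hrev : PySem.List.pyRange (((x :: xs).length : Int) - 1) 0 (-1)
        = (PySem.List.pyRange 1 ((x :: xs).length : Int) 1).reverse := by
      rw [PySem.List.pyRange_neg_one_eq_reverse]
      norm_num
    rw [hrev]
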